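-- pv_equiv track=rewrite | github.com/Eastonn/Dionysus | src/utils.py | hms_to_seconds
-- ===== SOURCE A (Python) =====
-- def hms_to_seconds(t):
--     parts = [int(i) for i in t.split(':')]
--     if len(parts) == 3:
--         h, m, s = parts
--     elif len(parts) == 2:
--         h = 0
--         m, s = parts
--     elif len(parts) == 1:
--         h = 0
--         m = 0
--         s = parts[0]
--     else:
--         raise ValueError(f"Invalid time format '{t}', expected 'h:m:s', 'm:s', or 's'")
--     return 3600 * h + 60 * m + s
-- ===== SOURCE B (Python) =====
-- def hms_to_seconds(t):
--     parts = [int(i) for i in t.split(':')]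
--     if not 1 <= len(parts) <= 3:
--         raise ValueError(f"Invalid time format '{t}', expected 'h:m:s', 'm:s', or 's'")
--     total = 0
--     for p in parts:
--         total = total * 60 + p
--     return total
-- ===== Notes on version B (the rewrite author's own statement) =====
-- stated objective: simpler
-- what changed: Replaces the length-dispatch with fixed coefficients (h,m,s unpacking per arity) by a single Horner fold total = total*60 + p over the parsed parts, with one length guard.
import Mathlib
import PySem

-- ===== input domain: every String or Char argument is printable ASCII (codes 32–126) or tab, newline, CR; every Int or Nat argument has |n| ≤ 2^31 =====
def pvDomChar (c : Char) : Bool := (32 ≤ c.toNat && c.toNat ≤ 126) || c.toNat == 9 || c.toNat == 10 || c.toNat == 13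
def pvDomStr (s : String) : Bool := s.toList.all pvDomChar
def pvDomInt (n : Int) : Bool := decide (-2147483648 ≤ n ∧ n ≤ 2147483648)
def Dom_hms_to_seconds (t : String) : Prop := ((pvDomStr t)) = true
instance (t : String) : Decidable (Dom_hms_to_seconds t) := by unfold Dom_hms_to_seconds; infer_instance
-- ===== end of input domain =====

-- B changes only the decomposition: a Horner fold (total = total*60 + p) replaces A's
-- per-arity unpacking with fixed coefficients; same values everywhere A returns.

-- ===== PORT A =====
-- parts = [int(i) for i in t.split(':')]; a failing int(i) is a ValueError (mapM = none, excluded by Pre_)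
def hms_to_seconds (t : String) : Int :=
  match (((PySem.Str.split? t ":").getD []).mapM PySem.Int.ofStr?) with
  | none => 0            -- ValueError from int(i): outside Pre_
  | some parts =>
    match parts with
    | [h, m, s] => 3600 * h + 60 * m + s
    | [m, s] => 3600 * 0 + 60 * m + s
    | [s] => 3600 * 0 + 60 * 0 + s
    | _ => 0             -- raise ValueError: outside Pre_

-- ===== PORT B =====
def hms_to_seconds_alt (t : String) : Int :=
  match (((PySem.Str.split? t ":").getD []).mapM PySem.Int.ofStr?) with
  | none => 0            -- ValueError from int(i): outside Pre_
  | some parts =>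
    if 1 ≤ parts.length ∧ parts.length ≤ 3 then
      List.foldl (fun total p => total * 60 + p) 0 parts
    else 0               -- raise ValueError: outside Pre_

-- ===== PRECONDITION & SPEC =====
-- Pre_ excludes exactly the ValueError inputs: a token int() rejects, or more than 3 parts.
def Pre_hms_to_seconds (t : String) : Prop :=
  (∀ s ∈ (PySem.Str.split? t ":").getD [], (PySem.Int.ofStr? s).isSome = true) ∧
  ((PySem.Str.split? t ":").getD []).length ≤ 3
instance (t : String) : Decidable (Pre_hms_to_seconds t) := by unfold Pre_hms_to_seconds; infer_instance

def pvWitness_hms_to_seconds : String := "1:2:3"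

def Spec_hms_to_seconds (t : String) (out : Int) : Prop := out = hms_to_seconds_alt t
instance (t : String) (out : Int) : Decidable (Spec_hms_to_seconds t out) := by unfold Spec_hms_to_seconds; infer_instance

-- ===== CLAIM (what is proved, stated in full; the proofs are below) =====
def Claim_equal_hms_to_seconds : Prop := ∀ (t : String), Dom_hms_to_seconds t → Pre_hms_to_seconds t → Spec_hms_to_seconds t (hms_to_seconds t)

-- ===== LEMMAS AND PROOFS =====
theorem pv_mapM_some {α β : Type} (f : α → Option β) :
    ∀ (xs : List α), (∀ s ∈ xs, (f s).isSome = true) →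
    ∃ ys, xs.mapM f = some ys ∧ ys.length = xs.length := by
  intro xs
  induction xs with
  | nil => intro _; exact ⟨[], rfl, rfl⟩
  | cons x xs ih =>
    intro h
    obtain ⟨y, hy⟩ := Option.isSome_iff_exists.mp (h x (List.mem_cons_self ..))
    obtain ⟨ys, hys, hlen⟩ := ih (fun s hs => h s (List.mem_cons_of_mem _ hs))
    exact ⟨y :: ys, by simp [List.mapM_cons, hy, hys], by simp [hlen]⟩

-- ===== VERDICT (by name: the statement is the Claim_ definition above) =====
theorem hms_to_seconds_spec : Claim_equal_hms_to_seconds := by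
  intro t _ hpre
  obtain ⟨hall, hlen⟩ := hpre
  obtain ⟨ps, hps, hplen⟩ := pv_mapM_some PySem.Int.ofStr? _ hall
  unfold Spec_hms_to_seconds hms_to_seconds hms_to_seconds_alt
  rw [hps]
  match ps, hplen with
  | [], h => simp [List.foldl]
  | [a], h => simp [List.foldl]
  | [a, b], h => simp [List.foldl]; ring
  | [a, b, c], h => simp [List.foldl]; ring
  | a :: b :: c :: d :: rest, h =>
    exfalso; rw [← h] at hlen; simp at hlen; omega
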